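-- pv_equiv track=rewrite | github.com/jronald88/python-lists-loops-programming-exercises | exercises/16-Techno_beat/app.py | lyrics_generator
-- ===== SOURCE A (Python) =====
-- def lyrics_generator(lyrics):
--     boom = "Boom "
--     DtB = "Drop the bass "
--     BtB = "!!!Break the bass!!! "
--     beat = ""
--     consecutive_count = 0
--     for i in lyrics:
--         if i == 0:
--             beat += boom
--             consecutive_count = 0
--         elif i == 1:
--             beat += DtB
--             consecutive_count += 1
--         else:
--             consecutive_count = 0
--         if consecutive_count == 3:
--             beat += BtB
--     return beat
-- ===== SOURCE B (Python) =====
-- def lyrics_generator(lyrics):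
--     # Run-length decomposition: group consecutive equal codes, then render each run.
--     runs = []
--     for v in lyrics:
--         if runs and runs[-1][0] == v:
--             w, L = runs[-1]
--             runs[-1] = (w, L + 1)
--         else:
--             runs.append((v, 1))
--     parts = []
--     for v, L in runs:
--         if v == 0:
--             parts.append("Boom " * L)
--         elif v == 1:
--             if L >= 3:
--                 parts.append("Drop the bass " * 3 + "!!!Break the bass!!! " + "Drop the bass " * (L - 3))
--             else:
--                 parts.append("Drop the bass " * L)
--         else:
--             parts.append("")
--     return "".join(parts)
-- ===== Notes on version B (the rewrite author's own statement) =====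
-- stated objective: alternative
-- what changed: Replaces the per-element consecutive_count state machine with run-length encoding: consecutive equal codes are grouped once, and each whole run is rendered in one step (the break emitted exactly once after the 3rd drop of a run of length >= 3).
import Mathlib
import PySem

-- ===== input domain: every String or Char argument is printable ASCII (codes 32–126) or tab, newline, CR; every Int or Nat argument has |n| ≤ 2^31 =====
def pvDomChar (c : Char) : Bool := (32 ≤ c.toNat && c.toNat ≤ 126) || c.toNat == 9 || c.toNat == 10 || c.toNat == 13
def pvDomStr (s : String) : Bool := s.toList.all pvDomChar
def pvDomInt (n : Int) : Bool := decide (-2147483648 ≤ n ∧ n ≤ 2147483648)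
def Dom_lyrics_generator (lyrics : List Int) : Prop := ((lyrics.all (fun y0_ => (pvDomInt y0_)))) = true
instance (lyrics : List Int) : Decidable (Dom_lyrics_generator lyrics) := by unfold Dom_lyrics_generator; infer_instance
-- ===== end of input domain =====

-- B replaces A's per-element consecutive_count state machine with run-length encoding
-- (group consecutive equal codes, render each whole run in one step): an alternative decomposition, same cost.


-- ===== PORT A =====
-- A's loop body: update beat/consecutive_count per element, append the break when the count hits 3
def lgStep (st : String × Int) (i : Int) : String × Int :=
  let st1 :=
    if i = 0 then (st.1 ++ "Boom ", (0 : Int))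
    else if i = 1 then (st.1 ++ "Drop the bass ", st.2 + 1)
    else (st.1, (0 : Int))
  if st1.2 = 3 then (st1.1 ++ "!!!Break the bass!!! ", st1.2) else st1

def lyrics_generator (lyrics : List Int) : String :=
  (lyrics.foldl lgStep ("", 0)).1

-- ===== PORT B =====
-- exact port of Python's  s * n  on str (negative n gives "")
def pyStrMul (s : String) (n : Int) : String :=
  String.ofList (PySem.List.pyRepeat s.toList n)

def renderRun (p : Int × Int) : String :=
  if p.1 = 0 then pyStrMul "Boom " p.2
  else if p.1 = 1 then
    if 3 ≤ p.2 then
      pyStrMul "Drop the bass " 3 ++ "!!!Break the bass!!! " ++ pyStrMul "Drop the bass " (p.2 - 3)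
    else pyStrMul "Drop the bass " p.2
  else ""

-- B's first loop body: extend the last run or start a new one
def runStep (runs : List (Int × Int)) (v : Int) : List (Int × Int) :=
  match runs.getLast? with
  | some (w, L) => if w = v then runs.dropLast ++ [(w, L + 1)] else runs ++ [(v, 1)]
  | none => [(v, 1)]

def lyrics_generator_alt (lyrics : List Int) : String :=
  let runs := lyrics.foldl runStep []
  PySem.Str.join "" (runs.map renderRun)

-- ===== PRECONDITION & SPEC =====
def Spec_lyrics_generator (lyrics : List Int) (out : String) : Prop := out = lyrics_generator_alt lyrics
instance (lyrics : List Int) (out : String) : Decidable (Spec_lyrics_generator lyrics out) := by unfold Spec_lyrics_generator; infer_instance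

-- ===== CLAIM (what is proved, stated in full; the proofs are below) =====
def Claim_equal_lyrics_generator : Prop := ∀ (lyrics : List Int), Dom_lyrics_generator lyrics → Spec_lyrics_generator lyrics (lyrics_generator lyrics)

-- ===== LEMMAS AND PROOFS =====

-- proof-side model of A's output, on List Char
def renderAL : List Int → Int → List Char
  | [], _ => []
  | i :: rest, c =>
    if i = 0 then "Boom ".toList ++ renderAL rest 0
    else if i = 1 then
      (if c + 1 = 3 then "Drop the bass ".toList ++ "!!!Break the bass!!! ".toList
       else "Drop the bass ".toList) ++ renderAL rest (c + 1)
    else renderAL rest 0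

lemma foldl_lgStep (l : List Int) : ∀ (acc : String) (c : Int),
    ((l.foldl lgStep (acc, c)).1).toList = acc.toList ++ renderAL l c := by
  induction l with
  | nil => intro acc c; simp [renderAL]
  | cons i rest ih =>
    intro acc c
    by_cases h0 : i = 0
    · simp [lgStep, renderAL, h0, ih]
    · by_cases h1 : i = 1
      · by_cases h3 : c + 1 = 3 <;>
          simp [lgStep, renderAL, h1, h3, ih]
      · simp [lgStep, renderAL, h0, h1, ih]

-- proof-side model of B's run builder
def rleAux (v : Int) (L : Int) : List Int → List (Int × Int)
  | [] => [(v, L)]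
  | i :: rest => if v = i then rleAux v (L + 1) rest else (v, L) :: rleAux i 1 rest

lemma foldl_runStep (l : List Int) : ∀ (pre : List (Int × Int)) (v L : Int),
    l.foldl runStep (pre ++ [(v, L)]) = pre ++ rleAux v L l := by
  induction l with
  | nil => intro pre v L; simp [rleAux]
  | cons i rest ih =>
    intro pre v L
    by_cases h : v = i
    · simp [runStep, rleAux, h, ih]
    · have : (pre ++ [(v, L)]) ++ [(i, 1)] = (pre ++ [(v, L)]) ++ [(i, 1)] := rfl
      simp only [List.foldl_cons, runStep, List.getLast?_concat, List.dropLast_concat, rleAux, if_neg h]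
      rw [ih (pre ++ [(v, L)]) i 1]
      simp

-- proof-side rendering of a run, on List Char
def renderRunL (p : Int × Int) : List Char :=
  if p.1 = 0 then PySem.List.pyRepeat "Boom ".toList p.2
  else if p.1 = 1 then
    if 3 ≤ p.2 then
      PySem.List.pyRepeat "Drop the bass ".toList 3 ++ "!!!Break the bass!!! ".toList
        ++ PySem.List.pyRepeat "Drop the bass ".toList (p.2 - 3)
    else PySem.List.pyRepeat "Drop the bass ".toList p.2
  else []

lemma toList_renderRun (p : Int × Int) : (renderRun p).toList = renderRunL p := by
  unfold renderRun renderRunL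
  split_ifs <;> simp [pyStrMul]

lemma pyRepeat_succ (s : List Char) (n : Int) (h : 0 ≤ n) :
    PySem.List.pyRepeat s (n + 1) = PySem.List.pyRepeat s n ++ s := by
  simp only [PySem.List.pyRepeat]
  rw [show (n + 1).toNat = n.toNat + 1 by omega, List.replicate_succ']
  simp

lemma join_nil_chars (parts : List (List Char)) : PySem.Chars.join [] parts = parts.flatten := by
  show List.intercalate [] parts = parts.flatten
  induction parts with
  | nil => simp [List.intercalate]
  | cons x xs ih => cases xs <;> simp_all [List.intercalate, List.intersperse]

-- A's count after a partial trailing run of value v and length L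
def cnt (v L : Int) : Int := if v = 1 then L else 0

lemma renderRunL_succ (v L : Int) (hL : 1 ≤ L) :
    renderRunL (v, L + 1) =
      renderRunL (v, L) ++
        (if v = 0 then "Boom ".toList
         else if v = 1 then
           (if cnt v L + 1 = 3 then "Drop the bass ".toList ++ "!!!Break the bass!!! ".toList
            else "Drop the bass ".toList)
         else []) := by
  by_cases h0 : v = 0
  · simp [renderRunL, h0, pyRepeat_succ _ L (by omega)]
  · by_cases h1 : v = 1
    · subst h1
      have e1 : ∀ M : Int, renderRunL (1, M) =
          if 3 ≤ M then
            PySem.List.pyRepeat "Drop the bass ".toList 3 ++ "!!!Break the bass!!! ".toList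
              ++ PySem.List.pyRepeat "Drop the bass ".toList (M - 3)
          else PySem.List.pyRepeat "Drop the bass ".toList M := by
        intro M; simp [renderRunL]
      rw [e1, e1]
      simp only [cnt, if_pos rfl]
      rcases show L = 1 ∨ L = 2 ∨ 3 ≤ L by omega with hc | hc | hc
      · subst hc
        rw [show (1 : Int) + 1 = 1 + 1 by rfl, pyRepeat_succ _ 1 (by omega)]
        norm_num
      · subst hc
        have h3 : PySem.List.pyRepeat "Drop the bass ".toList 3
            = PySem.List.pyRepeat "Drop the bass ".toList 2 ++ "Drop the bass ".toList := by
          rw [show (3 : Int) = 2 + 1 by norm_num]; exact pyRepeat_succ _ 2 (by omega)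
        rw [if_pos (show (3 : Int) ≤ 2 + 1 by norm_num), if_neg (show ¬ (3 : Int) ≤ 2 by norm_num), h3]
        simp [PySem.List.pyRepeat, List.append_assoc]
      · have hge1 : (3 : Int) ≤ L + 1 := by omega
        have hne : L + 1 ≠ 3 := by omega
        have h2 : L + 1 - 3 = (L - 3) + 1 := by omega
        rw [if_pos hc, if_pos hge1, h2, pyRepeat_succ _ (L - 3) (by omega)]
        simp [hne, List.append_assoc]
    · simp [renderRunL, h0, h1, cnt]

lemma flatten_rleAux (l : List Int) : ∀ (v L : Int), 1 ≤ L →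
    ((rleAux v L l).map renderRunL).flatten = renderRunL (v, L) ++ renderAL l (cnt v L) := by
  induction l with
  | nil => intro v L _; simp [rleAux, renderAL]
  | cons i rest ih =>
    intro v L hL
    by_cases h : v = i
    · subst h
      rw [show rleAux v L (v :: rest) = rleAux v (L + 1) rest by simp [rleAux]]
      rw [ih v (L + 1) (by omega)]
      rw [renderRunL_succ v L hL]
      by_cases h0 : v = 0
      · simp [renderAL, h0, cnt]
      · by_cases h1 : v = 1
        · subst h1
          by_cases h3 : cnt 1 L + 1 = 3 <;>
            simp_all [renderAL, cnt, List.append_assoc]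
        · simp [renderAL, h0, h1, cnt]
    · rw [show rleAux v L (i :: rest) = (v, L) :: rleAux i 1 rest by simp [rleAux, h]]
      simp only [List.map_cons, List.flatten_cons]
      rw [ih i 1 (by omega)]
      by_cases h0 : i = 0
      · simp [renderAL, renderRunL, h0, cnt, PySem.List.pyRepeat]
      · by_cases h1 : i = 1
        · have hv1 : v ≠ 1 := by rw [h1] at h; exact h
          subst h1
          simp [renderAL, renderRunL, h0, cnt, hv1, PySem.List.pyRepeat,
            show ¬ (3 : Int) ≤ 1 by omega]
        · simp [renderAL, renderRunL, h0, h1, cnt]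

lemma alt_toList (l : List Int) : (lyrics_generator_alt l).toList = renderAL l 0 := by
  unfold lyrics_generator_alt
  cases l with
  | nil => simp [renderAL]
  | cons i rest =>
    have hfold : (i :: rest).foldl runStep [] = rleAux i 1 rest := by
      rw [List.foldl_cons, show runStep [] i = [] ++ [(i, 1)] by simp [runStep]]
      rw [foldl_runStep rest [] i 1]; simp
    rw [hfold]
    simp only [PySem.Str.toList_join, List.map_map]
    rw [show ((rleAux i 1 rest).map (String.toList ∘ renderRun)) = (rleAux i 1 rest).map renderRunL by
      apply List.map_congr_left; intro p _; exact toList_renderRun p]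
    rw [show ("" : String).toList = [] by rfl, join_nil_chars]
    rw [flatten_rleAux rest i 1 (by omega)]
    by_cases h0 : i = 0
    · simp [renderAL, renderRunL, h0, cnt, PySem.List.pyRepeat]
    · by_cases h1 : i = 1
      · simp [renderAL, renderRunL, h1, cnt, PySem.List.pyRepeat, show ¬ (3:Int) ≤ 1 by omega]
      · simp [renderAL, renderRunL, h0, h1, cnt]

-- ===== VERDICT (by name: the statement is the Claim_ definition above) =====
theorem lyrics_generator_spec : Claim_equal_lyrics_generator := by
  intro lyrics _
  unfold Spec_lyrics_generator
  apply String.toList_inj.mp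
  rw [alt_toList]
  have := foldl_lgStep lyrics "" 0
  simpa [lyrics_generator] using this
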